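-- pv_equiv track=rewrite | github.com/juevn/CSED342 | assign1/submission.py | getFrequentWords
-- ===== SOURCE A (Python) =====
-- def getFrequentWords(text, freq):
--     """
--     Splits the string |text| by whitespace
--     and returns a set of words that appear at a given frequency |freq|.
--     """
--     # BEGIN_YOUR_ANSWER (our solution is 3 lines of code, but don't worry if you deviate from this)
--
--     wordlist = text.split(' ')
--     word_counter = dict()
--     for word in wordlist:
--         if(word not in word_counter):
--             word_counter[word] = 1
--         else:
--             word_counter[word] += 1
--
--     wordset = set()
--     for word in word_counter:
--         if(word_counter[word]==freq):
--             wordset.add(word)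
--
--     return wordset
-- ===== SOURCE B (Python) =====
-- def getFrequentWords(text, freq):
--     """
--     Splits the string |text| by whitespace
--     and returns a set of words that appear at a given frequency |freq|.
--     """
--     words = text.split(' ')
--     return {w for w in words if words.count(w) == freq}
-- ===== Notes on version B (the rewrite author's own statement) =====
-- stated objective: simpler
-- what changed: Replaces the explicit dict-counter build plus second dict scan with a single set comprehension that tests each word's frequency via list.count.
import Mathlib
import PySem

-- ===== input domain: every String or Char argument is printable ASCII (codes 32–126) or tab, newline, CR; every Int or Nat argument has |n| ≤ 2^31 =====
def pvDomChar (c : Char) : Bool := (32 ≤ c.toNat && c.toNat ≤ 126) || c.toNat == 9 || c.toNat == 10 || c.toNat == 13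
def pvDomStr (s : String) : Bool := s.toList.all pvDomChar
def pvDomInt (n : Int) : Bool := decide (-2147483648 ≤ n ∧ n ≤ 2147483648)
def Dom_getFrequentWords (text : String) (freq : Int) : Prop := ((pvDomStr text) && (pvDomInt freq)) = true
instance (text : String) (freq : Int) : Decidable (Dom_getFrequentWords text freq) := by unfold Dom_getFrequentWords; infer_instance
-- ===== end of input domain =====

-- B replaces A's dict-counter build + dict scan by a single set comprehension testing list.count; simpler, not faster.
-- The returned Python value is a set: the List String below holds its distinct elements (PySem.Set).

-- ===== PORT A =====
def getFrequentWords (text : String) (freq : Int) : List String :=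
  let wordlist := (PySem.Str.split? text " ").getD []
  let word_counter : PySem.Dict String Int := wordlist.foldl
    (fun d word => if ¬ (d.contains word = true) then d.insert word 1 else d.modify word 0 (· + 1))
    PySem.Dict.empty
  (PySem.Dict.keys word_counter).foldl
    (fun s word => if word_counter.getD word 0 = freq then PySem.Set.add s word else s)
    PySem.Set.empty

-- ===== PORT B =====
def getFrequentWords_alt (text : String) (freq : Int) : List String :=
  let words := (PySem.Str.split? text " ").getD []
  words.foldl
    (fun s w => if (PySem.List.count words w : Int) = freq then PySem.Set.add s w else s)
    PySem.Set.empty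

-- ===== PRECONDITION & SPEC =====
def Spec_getFrequentWords (text : String) (freq : Int) (out : List String) : Prop := out = getFrequentWords_alt text freq
instance (text : String) (freq : Int) (out : List String) : Decidable (Spec_getFrequentWords text freq out) := by unfold Spec_getFrequentWords; infer_instance

-- ===== CLAIM (what is proved, stated in full; the proofs are below) =====
def Claim_equal_getFrequentWords : Prop := ∀ (text : String) (freq : Int), Dom_getFrequentWords text freq → Spec_getFrequentWords text freq (getFrequentWords text freq)

-- ===== LEMMAS AND PROOFS =====

-- A's counter-building step is exactly Counter's step.
theorem counterStep_eq (d : PySem.Dict String Int) (w : String) :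
    (if ¬ (d.contains w = true) then d.insert w 1 else d.modify w 0 (· + 1)) = d.modify w 0 (· + 1) := by
  by_cases h : d.contains w = true
  · simp [h]
  · have h' : d.contains w = false := by simpa using h
    rw [PySem.Dict.modify]
    simp [h, PySem.Dict.getD_of_not_contains]

-- membership in B's filtered set-building fold
theorem mem_foldl_step (p : String → Bool) (xs : List String) (acc : List String) (y : String) :
    y ∈ xs.foldl (fun s w => if p w = true then PySem.Set.add s w else s) acc ↔
      y ∈ acc ∨ (y ∈ xs ∧ p y = true) := by
  induction xs generalizing acc with
  | nil => simp
  | cons x xs ih =>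
    by_cases h : p x = true
    · rcases eq_or_ne y x with rfl | hyx
      · simp [h, ih, PySem.Set.mem_add]
      · simp [h, ih, PySem.Set.mem_add, hyx]
    · rcases eq_or_ne y x with rfl | hyx
      · simp only [Bool.not_eq_true] at h
        simp [h, ih]
      · simp [h, ih, hyx]

-- crux: folding the filtered set-add step over set(xs) equals folding it over xs
theorem foldl_step_ofList (p : String → Bool) (xs : List String) :
    (PySem.Set.ofList xs).foldl (fun s w => if p w = true then PySem.Set.add s w else s) PySem.Set.empty =
      xs.foldl (fun s w => if p w = true then PySem.Set.add s w else s) PySem.Set.empty := by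
  induction xs using List.reverseRecOn with
  | nil => rfl
  | append_singleton xs x ih =>
    rw [PySem.Set.ofList_append_singleton]
    by_cases hx : x ∈ xs
    · have hmem : x ∈ PySem.Set.ofList xs := (PySem.Set.mem_ofList xs x).mpr hx
      rw [PySem.Set.add_of_mem hmem, ih, List.foldl_append]
      by_cases hp : p x = true
      · have : x ∈ xs.foldl (fun s w => if p w = true then PySem.Set.add s w else s) PySem.Set.empty := by
          rw [mem_foldl_step]; exact Or.inr ⟨hx, hp⟩
        simp only [List.foldl_cons, List.foldl_nil, hp, if_true]
        exact (PySem.Set.add_of_mem this).symm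
      · simp [hp]
    · have hnm : x ∉ PySem.Set.ofList xs := fun h => hx ((PySem.Set.mem_ofList xs x).mp h)
      rw [PySem.Set.add_of_not_mem hnm, List.foldl_append, List.foldl_append, ih]

-- ===== VERDICT (by name: the statement is the Claim_ definition above) =====
theorem getFrequentWords_spec : Claim_equal_getFrequentWords := by
  intro text freq _
  unfold Spec_getFrequentWords getFrequentWords getFrequentWords_alt
  dsimp only
  set ws := (PySem.Str.split? text " ").getD [] with hws
  have hcnt : ws.foldl
      (fun d word => if ¬ (d.contains word = true) then d.insert word 1 else d.modify word 0 (· + 1))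
      PySem.Dict.empty = PySem.Dict.counter ws := by
    rw [PySem.Dict.counter_eq_foldl]
    congr 1
    funext d w
    exact counterStep_eq d w
  rw [hcnt, PySem.Dict.keys_counter]
  simp only [PySem.Dict.getD_counter]
  have := foldl_step_ofList (fun w => decide ((ws.count w : Int) = freq)) ws
  simpa using this
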